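-- pv_equiv track=rewrite | github.com/Mitche-44/Python-demo | quiz9.py | solution
-- ===== SOURCE A (Python) =====
-- def solution(A, F, M):
--     N = len(A)
--     required_total = M * (N + F)
--     known_total = sum(A)
--     missing_sum = required_total - known_total
--
--     if missing_sum < F or missing_sum > F * 6:
--         return [0]
--
--
--     result = [1] * F
--     remaining = missing_sum - F
--
--     i = 0
--     while remaining > 0:
--         add = min(5, remaining)
--         result[i] += add
--         remaining -= add
--         i += 1
--
--     return result
-- ===== SOURCE B (Python) =====
-- def solution(A, F, M):
--     missing_sum = M * (len(A) + F) - sum(A)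
--     if missing_sum < F or missing_sum > F * 6:
--         return [0]
--     q, r = divmod(missing_sum - F, 5)
--     return [6] * q + ([1 + r] if r > 0 else []) + [1] * (F - q - (1 if r > 0 else 0))
-- ===== Notes on version B (the rewrite author's own statement) =====
-- stated objective: simpler
-- what changed: Replaces the greedy while-loop that increments dice one by one with a closed-form divmod: q full sixes, one partial die of 1+r if r>0, and the rest ones, assembled directly by list construction.
import Mathlib
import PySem

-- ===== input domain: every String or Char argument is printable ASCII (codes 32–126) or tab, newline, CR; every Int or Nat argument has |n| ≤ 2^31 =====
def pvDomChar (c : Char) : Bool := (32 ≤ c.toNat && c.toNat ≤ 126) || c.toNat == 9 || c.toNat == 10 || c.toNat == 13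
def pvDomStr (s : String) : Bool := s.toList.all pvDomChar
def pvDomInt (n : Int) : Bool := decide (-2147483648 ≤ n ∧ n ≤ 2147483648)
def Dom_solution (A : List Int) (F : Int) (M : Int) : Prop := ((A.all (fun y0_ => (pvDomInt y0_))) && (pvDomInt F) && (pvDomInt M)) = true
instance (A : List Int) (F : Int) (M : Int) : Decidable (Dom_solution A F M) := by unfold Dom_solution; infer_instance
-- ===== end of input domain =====

-- B replaces A's greedy while-loop by a closed-form divmod distribution (simpler; same behaviour).

-- ===== PORT A =====
-- the while loop of A: result[i] += min(5, remaining); remaining -= add; i += 1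
-- (result[i] read as getD; the guarded algorithm keeps i in range on every reachable state)
def solutionLoop (result : List Int) (remaining : Int) (i : Nat) : List Int :=
  if h : remaining > 0 then
    let add := min 5 remaining
    solutionLoop (result.set i (result.getD i 0 + add)) (remaining - add) (i + 1)
  else result
termination_by remaining.toNat
decreasing_by omega

def solution (A : List Int) (F : Int) (M : Int) : List Int :=
  let N : Int := A.length
  let required_total := M * (N + F)
  let known_total := A.sum
  let missing_sum := required_total - known_total
  if missing_sum < F ∨ missing_sum > F * 6 then [0]
  else
    let result := List.replicate F.toNat 1
    let remaining := missing_sum - F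
    solutionLoop result remaining 0

-- ===== PORT B =====
def solution_alt (A : List Int) (F : Int) (M : Int) : List Int :=
  let missing_sum := M * ((A.length : Int) + F) - A.sum
  if missing_sum < F ∨ missing_sum > F * 6 then [0]
  else
    let q := PySem.Int.floordiv (missing_sum - F) 5
    let r := PySem.Int.mod (missing_sum - F) 5
    List.replicate q.toNat 6 ++ (if r > 0 then [1 + r] else [])
      ++ List.replicate (F - q - (if r > 0 then 1 else 0)).toNat 1

-- ===== PRECONDITION & SPEC =====
def Spec_solution (A : List Int) (F : Int) (M : Int) (out : List Int) : Prop := out = solution_alt A F M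
instance (A : List Int) (F : Int) (M : Int) (out : List Int) : Decidable (Spec_solution A F M out) := by unfold Spec_solution; infer_instance

-- ===== CLAIM (what is proved, stated in full; the proofs are below) =====
def Claim_equal_solution : Prop := ∀ (A : List Int) (F : Int) (M : Int), Dom_solution A F M → Spec_solution A F M (solution A F M)

-- ===== LEMMAS AND PROOFS =====

theorem pv_set_append (pre : List Int) (x v : Int) (l : List Int) :
    (pre ++ x :: l).set pre.length v = pre ++ v :: l := by
  induction pre with
  | nil => simp
  | cons a t ih => simp [ih]

theorem pv_getD_append (pre : List Int) (x : Int) (l : List Int) :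
    (pre ++ x :: l).getD pre.length 0 = x := by
  induction pre with
  | nil => simp
  | cons a t ih => simp

theorem solutionLoop_stop (result : List Int) (r : Int) (i : Nat) (h : ¬ r > 0) :
    solutionLoop result r i = result := by
  rw [solutionLoop]; simp [h]

theorem solutionLoop_step (result : List Int) (r : Int) (i : Nat) (h : r > 0) :
    solutionLoop result r i
      = solutionLoop (result.set i (result.getD i 0 + min 5 r)) (r - min 5 r) (i + 1) := by
  conv_lhs => rw [solutionLoop]
  simp [h]

-- main loop invariant: starting from pre ++ [1,…,1] at index pre.length
theorem pv_loop_eq (k : Nat) : ∀ (r : Int) (n : Nat) (pre : List Int),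
    0 ≤ r → r ≤ 5 * n → r.toNat ≤ 5 * k →
    solutionLoop (pre ++ List.replicate n 1) r pre.length
      = pre ++ List.replicate (r / 5).toNat 6
          ++ (if r % 5 > 0 then [1 + r % 5] else [])
          ++ List.replicate ((n : Int) - r / 5 - (if r % 5 > 0 then 1 else 0)).toNat 1 := by
  induction k with
  | zero =>
    intro r n pre h0 _ hk
    have hr : r = 0 := by omega
    subst hr
    rw [solutionLoop_stop _ _ _ (by omega)]
    simp
  | succ k ih =>
    intro r n pre h0 h5n hk
    by_cases hr : r > 0
    · -- n ≥ 1
      obtain ⟨m, rfl⟩ : ∃ m, n = m + 1 := ⟨n - 1, by omega⟩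
      rw [show List.replicate (m + 1) (1 : Int) = 1 :: List.replicate m 1 from rfl]
      rw [solutionLoop_step _ _ _ hr, pv_set_append, pv_getD_append]
      by_cases h5 : r ≥ 5
      · have hmin : min 5 r = 5 := by omega
        rw [hmin]
        have : pre ++ (1 + 5) :: List.replicate m (1 : Int) = (pre ++ [6]) ++ List.replicate m 1 := by
          simp
        rw [this, show pre.length + 1 = (pre ++ [6]).length by simp]
        rw [ih (r - 5) m (pre ++ [6]) (by omega) (by omega) (by omega)]
        have hq : (r / 5).toNat = ((r - 5) / 5).toNat + 1 := by omega
        have hm : r % 5 = (r - 5) % 5 := by omega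
        have hc : ((m : Int) + 1) - r / 5 - (if r % 5 > 0 then 1 else 0)
            = (m : Int) - (r - 5) / 5 - (if (r - 5) % 5 > 0 then 1 else 0) := by
          rw [hm]; have : r / 5 = (r - 5) / 5 + 1 := by omega
          omega
        rw [hm] at hc ⊢
        push_cast at hc ⊢
        rw [hq, hc, List.replicate_succ]
        simp
      · -- 0 < r < 5 : single final step
        have hmin : min 5 r = r := by omega
        rw [hmin]
        rw [solutionLoop_stop _ _ _ (by omega)]
        have hq : (r / 5).toNat = 0 := by omega
        have hm : r % 5 = r := by omega
        rw [hq, hm]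
        simp only [if_pos hr]
        push_cast
        have hcnt : ((m : Int) + 1 - r / 5 - 1).toNat = m := by omega
        rw [hcnt]
        simp [add_comm]
    · have hr0 : r = 0 := by omega
      subst hr0
      rw [solutionLoop_stop _ _ _ (by omega)]
      simp

-- ===== VERDICT (by name: the statement is the Claim_ definition above) =====
theorem solution_spec : Claim_equal_solution := by
  intro A F M _
  unfold Spec_solution solution solution_alt
  simp only
  set ms := M * ((A.length : Int) + F) - A.sum with hms
  by_cases hg : ms < F ∨ ms > F * 6
  · simp [hg]
  · simp only [if_neg hg]
    push Not at hg
    have hF : 0 ≤ F := by nlinarith [hg.1, hg.2]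
    have h0 : 0 ≤ ms - F := by omega
    have h5 : ms - F ≤ 5 * F.toNat := by omega
    have hfd : PySem.Int.floordiv (ms - F) 5 = (ms - F) / 5 :=
      PySem.Int.floordiv_eq_ediv_of_pos (by omega)
    have hmd : PySem.Int.mod (ms - F) 5 = (ms - F) % 5 :=
      PySem.Int.mod_eq_emod_of_pos (by omega)
    have := pv_loop_eq (ms - F).toNat (ms - F) F.toNat [] h0 h5 (by omega)
    simp only [List.nil_append, List.length_nil] at this
    rw [this, hfd, hmd]
    have : ((F.toNat : Int)) = F := by omega
    rw [this]
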